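-- pv_equiv track=rewrite | github.com/ayanhussain81/PdfEditing | app.py | process_result_data_page4
-- ===== SOURCE A (Python) =====
-- def process_result_data_page4(row_data, checkbox_data,result):
--     count = 0
--
--     for entry in result:
--         qualification_value = entry.get('Name of qualification', '')
--         if qualification_value:
--             key = f'Text Field {116 + count}'
--             row_data[key] = qualification_value
--
--         institution_value = entry.get('Institution (TAFE, University, RTO)', '')
--         if institution_value:
--             key = f'Text Field {124+ count}'
--             row_data[key] = institution_value
--
--         year_value = entry.get('Year completed', '')
--         if year_value:
--             key = f'Text Field {129+ count}'
--             row_data[key] = year_value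
--
--         check_qualification_value = entry.get('Qualification', '')
--         if check_qualification_value.lower() == 'yes':
--             key = f'Check Box {135 + count}'
--             checkbox_data[key] = True
--
--         check_result_value = entry.get('Results', '')
--         if check_result_value.lower() == 'yes':
--             key = f'Check Box {141 + count}'
--             checkbox_data[key] = True
--
--         count += 1
--     return row_data, checkbox_data
-- ===== SOURCE B (Python) =====
-- def _collect(result, i):
--     """Recursively gather, back-to-front, the pending updates for result[i:]:
--     a list of (key, value) pairs destined for row_data and a list of keys
--     destined for checkbox_data (each to be set True)."""
--     if i == len(result):
--         return [], []
--     texts, checks = _collect(result, i + 1)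
--     entry = result[i]
--     # prepend this entry's updates in reverse field order, so the final
--     # lists come out in the same front-to-back order the form expects
--     for base, name in ((129, 'Year completed'),
--                        (124, 'Institution (TAFE, University, RTO)'),
--                        (116, 'Name of qualification')):
--         value = entry.get(name, '')
--         if value:
--             texts.insert(0, ('Text Field %d' % (base + i), value))
--     for base, name in ((141, 'Results'), (135, 'Qualification')):
--         if entry.get(name, '').lower() == 'yes':
--             checks.insert(0, 'Check Box %d' % (base + i))
--     return texts, checks
--
--
-- def process_result_data_page4(row_data, checkbox_data, result):
--     # phase 1: compute every update; phase 2: apply them to the dicts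
--     texts, checks = _collect(result, 0)
--     for key, value in texts:
--         row_data[key] = value
--     for key in checks:
--         checkbox_data[key] = True
--     return row_data, checkbox_data
-- ===== Notes on version B (the rewrite author's own statement) =====
-- stated objective: alternative
-- what changed: B is two-phase: a recursive helper builds the full lists of pending text/checkbox updates back-to-front (prepending each entry's updates), and a separate second pass applies them to the dicts; A mutates both dicts inline in a single indexed loop.
import Mathlib
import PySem

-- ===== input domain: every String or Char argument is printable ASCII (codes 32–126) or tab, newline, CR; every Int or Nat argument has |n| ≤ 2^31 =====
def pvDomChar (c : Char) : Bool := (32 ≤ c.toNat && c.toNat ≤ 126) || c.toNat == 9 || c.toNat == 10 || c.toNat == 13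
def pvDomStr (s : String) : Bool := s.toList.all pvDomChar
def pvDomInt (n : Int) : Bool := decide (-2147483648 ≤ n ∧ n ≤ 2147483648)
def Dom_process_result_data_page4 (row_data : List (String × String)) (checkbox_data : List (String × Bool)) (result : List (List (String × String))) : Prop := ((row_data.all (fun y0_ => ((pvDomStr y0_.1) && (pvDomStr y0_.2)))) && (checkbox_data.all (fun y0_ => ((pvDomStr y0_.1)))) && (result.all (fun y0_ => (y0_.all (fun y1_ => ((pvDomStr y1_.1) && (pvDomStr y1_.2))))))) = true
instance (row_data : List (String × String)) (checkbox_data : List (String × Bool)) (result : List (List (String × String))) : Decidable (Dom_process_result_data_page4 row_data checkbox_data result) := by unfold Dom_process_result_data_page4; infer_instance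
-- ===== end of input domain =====

-- B is two-phase (recursively collect all pending updates back-to-front, then apply them),
-- where A mutates the dicts inline in one indexed loop; same cost.
-- Both Pythons mutate row_data/checkbox_data in place; the equivalence proved here is about the return value.

-- ===== PORT A =====
-- the body of A's `for entry in result` loop, on state (row_data, checkbox_data, count)
def stepA (st : PySem.Dict String String × PySem.Dict String Bool × Int)
    (entry : List (String × String)) :
    PySem.Dict String String × PySem.Dict String Bool × Int :=
  let e := PySem.Dict.mk entry
  let rd := st.1
  let cb := st.2.1
  let count := st.2.2
  let qualification_value := e.getD "Name of qualification" ""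
  let rd := if qualification_value == "" then rd
    else rd.insert ("Text Field " ++ PySem.Int.toStr (116 + count)) qualification_value
  let institution_value := e.getD "Institution (TAFE, University, RTO)" ""
  let rd := if institution_value == "" then rd
    else rd.insert ("Text Field " ++ PySem.Int.toStr (124 + count)) institution_value
  let year_value := e.getD "Year completed" ""
  let rd := if year_value == "" then rd
    else rd.insert ("Text Field " ++ PySem.Int.toStr (129 + count)) year_value
  let check_qualification_value := e.getD "Qualification" ""
  let cb := if PySem.Str.lower check_qualification_value == "yes" then
      cb.insert ("Check Box " ++ PySem.Int.toStr (135 + count)) true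
    else cb
  let check_result_value := e.getD "Results" ""
  let cb := if PySem.Str.lower check_result_value == "yes" then
      cb.insert ("Check Box " ++ PySem.Int.toStr (141 + count)) true
    else cb
  (rd, cb, count + 1)

def process_result_data_page4 (row_data : List (String × String)) (checkbox_data : List (String × Bool)) (result : List (List (String × String))) : (List (String × String)) × (List (String × Bool)) :=
  let st := result.foldl stepA (PySem.Dict.mk row_data, PySem.Dict.mk checkbox_data, 0)
  (st.1.items, st.2.1.items)

-- ===== PORT B =====
-- B's recursive helper `_collect(result, i)` on the tail `result[i:]` (structural recursion
-- on the tail carries the `i == len(result)` base case); `list.insert(0, x)` is cons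
def collectB : List (List (String × String)) → Int →
    List (String × String) × List String
  | [], _ => ([], [])
  | entry :: rest, i =>
    let tc := collectB rest (i + 1)
    let e := PySem.Dict.mk entry
    let texts := [((129 : Int), "Year completed"),
                  (124, "Institution (TAFE, University, RTO)"),
                  (116, "Name of qualification")].foldl
      (fun acc q =>
        let value := e.getD q.2 ""
        if value == "" then acc
        else ("Text Field " ++ PySem.Int.toStr (q.1 + i), value) :: acc) tc.1
    let checks := [((141 : Int), "Results"), (135, "Qualification")].foldl
      (fun acc q =>
        if PySem.Str.lower (e.getD q.2 "") == "yes" then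
          ("Check Box " ++ PySem.Int.toStr (q.1 + i)) :: acc
        else acc) tc.2
    (texts, checks)

def process_result_data_page4_alt (row_data : List (String × String)) (checkbox_data : List (String × Bool)) (result : List (List (String × String))) : (List (String × String)) × (List (String × Bool)) :=
  let tc := collectB result 0
  let rd := tc.1.foldl (fun d p => d.insert p.1 p.2) (PySem.Dict.mk row_data)
  let cb := tc.2.foldl (fun d k => d.insert k true) (PySem.Dict.mk checkbox_data)
  (rd.items, cb.items)

-- ===== PRECONDITION & SPEC =====
def Spec_process_result_data_page4 (row_data : List (String × String)) (checkbox_data : List (String × Bool)) (result : List (List (String × String))) (out : (List (String × String)) × (List (String × Bool))) : Prop := out = process_result_data_page4_alt row_data checkbox_data result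
instance (row_data : List (String × String)) (checkbox_data : List (String × Bool)) (result : List (List (String × String))) (out : (List (String × String)) × (List (String × Bool))) : Decidable (Spec_process_result_data_page4 row_data checkbox_data result out) := by unfold Spec_process_result_data_page4; infer_instance

-- ===== CLAIM (what is proved, stated in full; the proofs are below) =====
def Claim_equal_process_result_data_page4 : Prop := ∀ (row_data : List (String × String)) (checkbox_data : List (String × Bool)) (result : List (List (String × String))), Dom_process_result_data_page4 row_data checkbox_data result → Spec_process_result_data_page4 row_data checkbox_data result (process_result_data_page4 row_data checkbox_data result)

-- ===== LEMMAS AND PROOFS =====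

-- applying the updates B collects for one entry (prepended onto ts/cs) from dicts (rd, cb)
-- is the same as applying ts/cs from the dicts A's loop body produces at counter k
theorem entry_eq (entry : List (String × String)) (rest : List (List (String × String)))
    (k : Int) (rd : PySem.Dict String String) (cb : PySem.Dict String Bool) :
    ((collectB (entry :: rest) k).1.foldl (fun d p => d.insert p.1 p.2) rd,
     (collectB (entry :: rest) k).2.foldl (fun d s => d.insert s true) cb)
    = ((collectB rest (k + 1)).1.foldl (fun d p => d.insert p.1 p.2)
         (stepA (rd, cb, k) entry).1,
       (collectB rest (k + 1)).2.foldl (fun d s => d.insert s true)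
         (stepA (rd, cb, k) entry).2.1) := by
  simp only [collectB, stepA, List.foldl_cons, List.foldl_nil]
  split_ifs <;> simp [Int.add_comm]

-- main invariant: A's fold equals applying B's collected updates
theorem fold_eq (result : List (List (String × String))) (k : Int)
    (rd : PySem.Dict String String) (cb : PySem.Dict String Bool) :
    ((result.foldl stepA (rd, cb, k)).1, (result.foldl stepA (rd, cb, k)).2.1)
    = ((collectB result k).1.foldl (fun d p => d.insert p.1 p.2) rd,
       (collectB result k).2.foldl (fun d s => d.insert s true) cb) := by
  induction result generalizing rd cb k with
  | nil => simp [collectB]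
  | cons e rest ih =>
    rw [entry_eq]
    simp only [List.foldl_cons]
    have hs : stepA (rd, cb, k) e
        = ((stepA (rd, cb, k) e).1, (stepA (rd, cb, k) e).2.1, k + 1) := by
      simp [stepA]
    rw [hs]
    exact ih _ _ _

-- ===== VERDICT (by name: the statement is the Claim_ definition above) =====
theorem process_result_data_page4_spec : Claim_equal_process_result_data_page4 := by
  intro row_data checkbox_data result _
  unfold Spec_process_result_data_page4 process_result_data_page4 process_result_data_page4_alt
  have h := fold_eq result 0 (PySem.Dict.mk row_data) (PySem.Dict.mk checkbox_data)
  simp only [Prod.ext_iff] at h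
  simp [h.1, h.2]
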